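-- pv_equiv track=rewrite | github.com/zmh2000829/cve_backporting | agents/dryrun_helpers.py | split_hunk_segments
-- ===== SOURCE A (Python) =====
-- from typing import List
--
-- _NOISE_PREFIXES = ("\\",)
--
-- def clean_hunk_lines(lines: List[str]) -> List[str]:
--     return [line for line in lines
--             if not any(line.startswith(prefix) for prefix in _NOISE_PREFIXES)]
--
-- def split_hunk_segments(hunk_lines: List[str]):
--     """拆分 hunk → (ctx_before, removed, added, ctx_after)。"""
--     clean = clean_hunk_lines(hunk_lines)
--     ctx_before, removed, added, ctx_after = [], [], [], []
--     first_change, last_change = len(clean), -1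
--
--     for idx, line in enumerate(clean):
--         if line.startswith("-") or line.startswith("+"):
--             first_change = min(first_change, idx)
--             last_change = max(last_change, idx)
--
--     for idx, line in enumerate(clean):
--         if line.startswith("-"):
--             removed.append(line[1:])
--         elif line.startswith("+"):
--             added.append(line[1:])
--         else:
--             text = line[1:] if line.startswith(" ") else line
--             if idx < first_change:
--                 ctx_before.append(text)
--             elif idx > last_change:
--                 ctx_after.append(text)
--
--     return ctx_before, removed, added, ctx_after
-- ===== SOURCE B (Python) =====
-- from typing import List
--
-- _NOISE_PREFIXES = ("\\",)
--
-- def clean_hunk_lines(lines: List[str]) -> List[str]: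
--     return [line for line in lines
--             if not any(line.startswith(prefix) for prefix in _NOISE_PREFIXES)]
--
-- def split_hunk_segments(hunk_lines: List[str]):
--     """Single stateful pass: buffer trailing context in `pending`, flushed on each change."""
--     ctx_before, removed, added, pending = [], [], [], []
--     seen_change = False
--     for line in clean_hunk_lines(hunk_lines):
--         if line.startswith("-"):
--             removed.append(line[1:])
--             seen_change = True
--             pending = []
--         elif line.startswith("+"):
--             added.append(line[1:])
--             seen_change = True
--             pending = []
--         else:
--             text = line[1:] if line.startswith(" ") else line
--             (pending if seen_change else ctx_before).append(text)
--     return ctx_before, removed, added, pending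
-- ===== Notes on version B (the rewrite author's own statement) =====
-- stated objective: alternative
-- what changed: A's two index-based passes (compute first/last change indices, then classify each context line by position) are replaced by a single stateful pass that buffers trailing context in a pending list flushed at every change line.
import Mathlib
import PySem

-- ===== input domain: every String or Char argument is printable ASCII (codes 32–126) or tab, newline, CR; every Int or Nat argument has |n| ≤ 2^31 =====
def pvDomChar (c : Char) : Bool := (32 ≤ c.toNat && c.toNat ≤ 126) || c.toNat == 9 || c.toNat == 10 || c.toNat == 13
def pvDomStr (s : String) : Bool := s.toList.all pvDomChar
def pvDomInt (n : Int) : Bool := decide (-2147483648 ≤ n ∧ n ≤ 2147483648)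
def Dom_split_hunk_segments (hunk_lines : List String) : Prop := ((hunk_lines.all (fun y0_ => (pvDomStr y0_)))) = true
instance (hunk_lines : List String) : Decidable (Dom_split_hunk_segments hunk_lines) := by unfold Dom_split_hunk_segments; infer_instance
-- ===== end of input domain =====

-- B replaces A's two index-based passes (find first/last change, then classify by position)
-- with one stateful pass buffering trailing context in `pending`, flushed at each change
-- (objective: alternative decomposition, same asymptotic cost).

-- ===== PORT A =====
-- first loop body: first_change = min(first_change, idx); last_change = max(last_change, idx) on change lines
def pvStep1 (st : Int × Int) (p : Int × String) : Int × Int :=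
  if PySem.Str.startswith p.2 "-" || PySem.Str.startswith p.2 "+" then (min st.1 p.1, max st.2 p.1) else st

-- second loop body, classifying by position relative to (first_change, last_change) = fl
def pvStep2 (fl : Int × Int) (st : List String × List String × List String × List String)
    (p : Int × String) : List String × List String × List String × List String :=
  if PySem.Str.startswith p.2 "-" then
    (st.1, st.2.1 ++ [PySem.Str.slice p.2 (some 1) none], st.2.2.1, st.2.2.2)
  else if PySem.Str.startswith p.2 "+" then
    (st.1, st.2.1, st.2.2.1 ++ [PySem.Str.slice p.2 (some 1) none], st.2.2.2)
  else
    let text := if PySem.Str.startswith p.2 " " then PySem.Str.slice p.2 (some 1) none else p.2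
    if p.1 < fl.1 then (st.1 ++ [text], st.2.1, st.2.2.1, st.2.2.2)
    else if p.1 > fl.2 then (st.1, st.2.1, st.2.2.1, st.2.2.2 ++ [text])
    else st

def split_hunk_segments (hunk_lines : List String) :
    List String × List String × List String × List String :=
  let clean := hunk_lines.filter (fun line => !(["\\"].any (fun pre => PySem.Str.startswith line pre)))
  let fl := (PySem.List.enumerate clean 0).foldl pvStep1 ((clean.length : Int), -1)
  (PySem.List.enumerate clean 0).foldl (pvStep2 fl) ([], [], [], [])

-- ===== PORT B =====
-- single-pass loop body; state = (ctx_before, removed, added, seen_change, pending)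
def pvStepB (st : List String × List String × List String × Bool × List String)
    (line : String) : List String × List String × List String × Bool × List String :=
  if PySem.Str.startswith line "-" then
    (st.1, st.2.1 ++ [PySem.Str.slice line (some 1) none], st.2.2.1, true, [])
  else if PySem.Str.startswith line "+" then
    (st.1, st.2.1, st.2.2.1 ++ [PySem.Str.slice line (some 1) none], true, [])
  else
    let text := if PySem.Str.startswith line " " then PySem.Str.slice line (some 1) none else line
    if st.2.2.2.1 then (st.1, st.2.1, st.2.2.1, st.2.2.2.1, st.2.2.2.2 ++ [text])
    else (st.1 ++ [text], st.2.1, st.2.2.1, st.2.2.2.1, st.2.2.2.2)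

def split_hunk_segments_alt (hunk_lines : List String) :
    List String × List String × List String × List String :=
  let clean := hunk_lines.filter (fun line => !(["\\"].any (fun pre => PySem.Str.startswith line pre)))
  let st := clean.foldl pvStepB ([], [], [], false, [])
  (st.1, st.2.1, st.2.2.1, st.2.2.2.2)

-- ===== PRECONDITION & SPEC =====
def Spec_split_hunk_segments (hunk_lines : List String) (out : List String × List String × List String × List String) : Prop := out = split_hunk_segments_alt hunk_lines
instance (hunk_lines : List String) (out : List String × List String × List String × List String) : Decidable (Spec_split_hunk_segments hunk_lines out) := by unfold Spec_split_hunk_segments; infer_instance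

-- ===== CLAIM (what is proved, stated in full; the proofs are below) =====
def Claim_equal_split_hunk_segments : Prop := ∀ (hunk_lines : List String), Dom_split_hunk_segments hunk_lines → Spec_split_hunk_segments hunk_lines (split_hunk_segments hunk_lines)

-- ===== LEMMAS AND PROOFS =====

-- "is a change line" and "context text" as A and B both compute them
def pvChg (s : String) : Bool := PySem.Str.startswith s "-" || PySem.Str.startswith s "+"

def pvTxt (s : String) : String :=
  if PySem.Str.startswith s " " then PySem.Str.slice s (some 1) none else s

def pvRm : List String → List String
  | [] => []
  | s :: l => if PySem.Str.startswith s "-" then PySem.Str.slice s (some 1) none :: pvRm l else pvRm l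

def pvAd : List String → List String
  | [] => []
  | s :: l =>
    if PySem.Str.startswith s "-" then pvAd l
    else if PySem.Str.startswith s "+" then PySem.Str.slice s (some 1) none :: pvAd l
    else pvAd l

-- the change-free tail segment, already text-stripped
def pvTail (l : List String) : List String :=
  ((l.reverse.takeWhile (fun s => !pvChg s)).reverse).map pvTxt

lemma pvFun_not_not : (fun s : String => !(!pvChg s)) = pvChg := by
  funext s; simp

lemma pvRm_append (a b : List String) : pvRm (a ++ b) = pvRm a ++ pvRm b := by
  induction a with
  | nil => simp [pvRm]
  | cons x a ih => by_cases h : PySem.Chars.startswith x.toList ['-'] = true <;> simp [pvRm, h, ih]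

lemma pvAd_append (a b : List String) : pvAd (a ++ b) = pvAd a ++ pvAd b := by
  induction a with
  | nil => simp [pvAd]
  | cons x a ih =>
    by_cases h : PySem.Chars.startswith x.toList ['-'] = true <;>
      by_cases h' : PySem.Chars.startswith x.toList ['+'] = true <;> simp [pvAd, h, h', ih]

lemma pvRm_nil_of (l : List String) (h : ∀ s ∈ l, pvChg s = false) : pvRm l = [] := by
  induction l with
  | nil => rfl
  | cons x l ih =>
    have hx := h x (List.mem_cons_self)
    simp [pvChg, Bool.or_eq_false_iff] at hx
    simp [pvRm, hx.1, ih fun s hs => h s (List.mem_cons_of_mem _ hs)]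

lemma pvAd_nil_of (l : List String) (h : ∀ s ∈ l, pvChg s = false) : pvAd l = [] := by
  induction l with
  | nil => rfl
  | cons x l ih =>
    have hx := h x (List.mem_cons_self)
    simp [pvChg, Bool.or_eq_false_iff] at hx
    simp [pvAd, hx.1, hx.2, ih fun s hs => h s (List.mem_cons_of_mem _ hs)]

lemma pvTakeWhile_all (l : List String) (h : l.any pvChg = false) :
    l.takeWhile (fun s => !pvChg s) = l := by
  rw [List.takeWhile_eq_self_iff]
  intro x hx
  simp [List.any_eq_false.mp h x hx]

lemma pvLenTakeWhile_lt (l : List String) (h : l.any pvChg = true) :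
    (l.takeWhile (fun s => !pvChg s)).length < l.length := by
  rw [List.takeWhile_eq_take_findIdx_not, pvFun_not_not, List.length_take]
  have := List.findIdx_lt_length_of_exists (by simpa [List.any_eq_true] using h)
  omega

lemma pvTail_cons_chg (x : String) (l : List String) (hx : pvChg x = true) :
    pvTail (x :: l) = if l.any pvChg then pvTail l else l.map pvTxt := by
  unfold pvTail
  rw [List.reverse_cons, List.takeWhile_append]
  by_cases h : l.any pvChg
  · rw [if_neg, if_pos h]
    have := pvLenTakeWhile_lt l.reverse (by simpa [List.any_reverse] using h)
    simp only [List.length_reverse] at this ⊢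
    omega
  · rw [if_pos, if_neg (by simpa using h)]
    · simp [List.takeWhile, hx]
    · rw [pvTakeWhile_all l.reverse (by simpa [List.any_reverse] using h)]

lemma pvTail_cons_nchg (x : String) (l : List String) (h : l.any pvChg = true) :
    pvTail (x :: l) = pvTail l := by
  unfold pvTail
  rw [List.reverse_cons, List.takeWhile_append, if_neg]
  have := pvLenTakeWhile_lt l.reverse (by simpa [List.any_reverse] using h)
  simp only [List.length_reverse] at this ⊢
  omega

-- ===== B-side characterisation =====

lemma B_seen (l : List String) : ∀ (cb rm ad pend : List String),
    l.foldl pvStepB (cb, rm, ad, true, pend) =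
      (cb, rm ++ pvRm l, ad ++ pvAd l, true,
        if l.any pvChg then pvTail l else pend ++ l.map pvTxt) := by
  induction l with
  | nil => intro cb rm ad pend; simp [pvRm, pvAd, pvTail]
  | cons x l ih =>
    intro cb rm ad pend
    by_cases hm : PySem.Chars.startswith x.toList ['-'] = true
    · have hx : pvChg x = true := by simp [pvChg, hm]
      rw [List.foldl_cons, show pvStepB (cb, rm, ad, true, pend) x = (cb, rm ++ [PySem.Str.slice x (some 1) none], ad, true, []) from by simp [pvStepB, hm]]
      rw [ih]
      simp [pvRm, pvAd, hm, pvTail_cons_chg x l hx, hx]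
    · by_cases hp : PySem.Chars.startswith x.toList ['+'] = true
      · have hx : pvChg x = true := by simp [pvChg, hp]
        rw [List.foldl_cons, show pvStepB (cb, rm, ad, true, pend) x = (cb, rm, ad ++ [PySem.Str.slice x (some 1) none], true, []) from by simp [pvStepB, hm, hp]]
        rw [ih]
        simp [pvRm, pvAd, hm, hp, pvTail_cons_chg x l hx, hx]
      · have hx : pvChg x = false := by simp [pvChg, hm, hp]
        rw [List.foldl_cons, show pvStepB (cb, rm, ad, true, pend) x = (cb, rm, ad, true, pend ++ [pvTxt x]) from by simp [pvStepB, pvTxt, hm, hp]]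
        rw [ih]
        by_cases h : l.any pvChg
        · simp [pvRm, pvAd, hm, hp, pvTail_cons_nchg x l h, h, hx]
        · simp [pvRm, pvAd, hm, hp, h, hx, pvTxt]

lemma B_unseen (l : List String) : ∀ (cb rm ad : List String),
    l.foldl pvStepB (cb, rm, ad, false, []) =
      (cb ++ (l.takeWhile (fun s => !pvChg s)).map pvTxt, rm ++ pvRm l, ad ++ pvAd l,
        l.any pvChg, if l.any pvChg then pvTail l else []) := by
  induction l with
  | nil => intro cb rm ad; simp [pvRm, pvAd]
  | cons x l ih =>
    intro cb rm ad
    by_cases hm : PySem.Chars.startswith x.toList ['-'] = true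
    · have hx : pvChg x = true := by simp [pvChg, hm]
      rw [List.foldl_cons, show pvStepB (cb, rm, ad, false, []) x = (cb, rm ++ [PySem.Str.slice x (some 1) none], ad, true, []) from by simp [pvStepB, hm]]
      rw [B_seen]
      simp [pvRm, pvAd, hm, pvTail_cons_chg x l hx, hx, List.takeWhile_cons, List.any_cons]
    · by_cases hp : PySem.Chars.startswith x.toList ['+'] = true
      · have hx : pvChg x = true := by simp [pvChg, hp]
        rw [List.foldl_cons, show pvStepB (cb, rm, ad, false, []) x = (cb, rm, ad ++ [PySem.Str.slice x (some 1) none], true, []) from by simp [pvStepB, hm, hp]]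
        rw [B_seen]
        simp [pvRm, pvAd, hm, hp, pvTail_cons_chg x l hx, hx, List.takeWhile_cons, List.any_cons]
      · have hx : pvChg x = false := by simp [pvChg, hm, hp]
        rw [List.foldl_cons, show pvStepB (cb, rm, ad, false, []) x = (cb ++ [pvTxt x], rm, ad, false, []) from by simp [pvStepB, pvTxt, hm, hp]]
        rw [ih]
        by_cases h : l.any pvChg
        · simp [pvRm, pvAd, hm, hp, pvTail_cons_nchg x l h, h, hx, List.takeWhile_cons, pvTxt]
        · simp [pvRm, pvAd, hm, hp, h, hx, List.takeWhile_cons, pvTxt]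

-- ===== A-side characterisation =====

lemma A_loop1 (l : List String) : ∀ (k fc0 lc0 : Int),
    (PySem.List.enumerate l k).foldl pvStep1 (fc0, lc0) =
      if l.any pvChg then
        (min fc0 (k + List.findIdx pvChg l),
         max lc0 (k + l.length - 1 - List.findIdx pvChg l.reverse))
      else (fc0, lc0) := by
  induction l with
  | nil => intro k fc0 lc0; simp [PySem.List.enumerate]
  | cons x l ih =>
    intro k fc0 lc0
    rw [PySem.List.enumerate_cons, List.foldl_cons]
    have hstep : pvStep1 (fc0, lc0) (k, x) =
        if pvChg x then (min fc0 k, max lc0 k) else (fc0, lc0) := rfl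
    rw [hstep, ih]
    by_cases hx : pvChg x = true
    · by_cases h : l.any pvChg
      · have hfl := List.findIdx_lt_length_of_exists (p := pvChg) (xs := l.reverse)
          (by simpa [List.any_eq_true, List.any_reverse] using h)
        simp only [hx, if_true, h, List.any_cons, Bool.true_or, List.findIdx_cons, cond_true,
          List.reverse_cons, List.findIdx_append, List.length_reverse]
        rw [if_pos (by simpa using hfl)]
        have h1 : (0 : Nat) ≤ List.findIdx pvChg l := Nat.zero_le _
        simp only [List.length_reverse] at hfl
        simp only [Prod.mk.injEq, List.length_cons, Bool.false_eq_true, reduceIte]; constructor <;> (push_cast; omega)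
      · have hfl : List.findIdx pvChg l.reverse = l.length := by
          rw [List.findIdx_eq_length.mpr, List.length_reverse]
          intro s hs
          simpa using List.any_eq_false.mp (by simpa using h) s (List.mem_reverse.mp hs)
        simp only [hx, if_true, h, if_false, List.any_cons, Bool.true_or, List.findIdx_cons,
          cond_true, List.reverse_cons, List.findIdx_append, List.length_reverse, hfl]
        rw [if_neg (lt_irrefl l.length)]
        simp only [Prod.mk.injEq, List.length_cons, Bool.false_eq_true, reduceIte]; constructor <;> (push_cast; omega)
    · have hx' : pvChg x = false := by simpa using hx
      by_cases h : l.any pvChg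
      · have hfl := List.findIdx_lt_length_of_exists (p := pvChg) (xs := l.reverse)
          (by simpa [List.any_eq_true, List.any_reverse] using h)
        simp only [List.length_reverse] at hfl
        simp only [hx', if_false, Bool.false_eq_true, h, if_true, List.any_cons, Bool.false_or,
          List.findIdx_cons, cond_false, List.reverse_cons, List.findIdx_append,
          List.length_reverse]
        rw [if_pos (by simpa using hfl)]
        simp only [Prod.mk.injEq, List.length_cons, Bool.false_eq_true, reduceIte]; constructor <;> (push_cast; omega)
      · simp [hx', h]

lemma A_pre (fc lc : Int) (l : List String) : ∀ (k : Int) (cb rm ad ca : List String),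
    (∀ s ∈ l, pvChg s = false) → k + l.length ≤ fc →
    (PySem.List.enumerate l k).foldl (pvStep2 (fc, lc)) (cb, rm, ad, ca) =
      (cb ++ l.map pvTxt, rm, ad, ca) := by
  induction l with
  | nil => intro k cb rm ad ca _ _; simp [PySem.List.enumerate]
  | cons x l ih =>
    intro k cb rm ad ca h1 h2
    have hx := h1 x (List.mem_cons_self)
    simp [pvChg, Bool.or_eq_false_iff] at hx
    obtain ⟨hx1, hx2⟩ := hx
    have hk : k < fc := by
      simp only [List.length_cons] at h2; push_cast at h2; omega
    rw [PySem.List.enumerate_cons, List.foldl_cons]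
    have hstep : pvStep2 (fc, lc) (cb, rm, ad, ca) (k, x) = (cb ++ [pvTxt x], rm, ad, ca) := by
      simp [pvStep2, hx1, hx2, hk, pvTxt]
    rw [hstep, ih (k + 1) _ _ _ _ (fun s hs => h1 s (List.mem_cons_of_mem _ hs))
      (by simp only [List.length_cons] at h2 ⊢; push_cast at h2 ⊢; omega)]
    simp

lemma A_mid (fc lc : Int) (l : List String) : ∀ (k : Int) (cb rm ad ca : List String),
    fc ≤ k → k + l.length ≤ lc + 1 →
    (PySem.List.enumerate l k).foldl (pvStep2 (fc, lc)) (cb, rm, ad, ca) =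
      (cb, rm ++ pvRm l, ad ++ pvAd l, ca) := by
  induction l with
  | nil => intro k cb rm ad ca _ _; simp [PySem.List.enumerate, pvRm, pvAd]
  | cons x l ih =>
    intro k cb rm ad ca h1 h2
    simp only [List.length_cons] at h2
    push_cast at h2
    rw [PySem.List.enumerate_cons, List.foldl_cons]
    by_cases hm : PySem.Chars.startswith x.toList ['-'] = true
    · have hstep : pvStep2 (fc, lc) (cb, rm, ad, ca) (k, x) =
          (cb, rm ++ [PySem.Str.slice x (some 1) none], ad, ca) := by simp [pvStep2, hm]
      rw [hstep, ih (k + 1) _ _ _ _ (by omega) (by push_cast; omega)]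
      simp [pvRm, pvAd, hm]
    · by_cases hp : PySem.Chars.startswith x.toList ['+'] = true
      · have hstep : pvStep2 (fc, lc) (cb, rm, ad, ca) (k, x) =
            (cb, rm, ad ++ [PySem.Str.slice x (some 1) none], ca) := by simp [pvStep2, hm, hp]
        rw [hstep, ih (k + 1) _ _ _ _ (by omega) (by push_cast; omega)]
        simp [pvRm, pvAd, hm, hp]
      · have hstep : pvStep2 (fc, lc) (cb, rm, ad, ca) (k, x) = (cb, rm, ad, ca) := by
          simp [pvStep2, hm, hp, show ¬(k < fc) by omega, show ¬(k > lc) by omega]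
        rw [hstep, ih (k + 1) _ _ _ _ (by omega) (by push_cast; omega)]
        simp [pvRm, pvAd, hm, hp]

lemma A_post (fc lc : Int) (l : List String) : ∀ (k : Int) (cb rm ad ca : List String),
    (∀ s ∈ l, pvChg s = false) → fc ≤ k → lc < k →
    (PySem.List.enumerate l k).foldl (pvStep2 (fc, lc)) (cb, rm, ad, ca) =
      (cb, rm, ad, ca ++ l.map pvTxt) := by
  induction l with
  | nil => intro k cb rm ad ca _ _ _; simp [PySem.List.enumerate]
  | cons x l ih =>
    intro k cb rm ad ca h1 h2 h3
    have hx := h1 x (List.mem_cons_self)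
    simp [pvChg, Bool.or_eq_false_iff] at hx
    obtain ⟨hx1, hx2⟩ := hx
    rw [PySem.List.enumerate_cons, List.foldl_cons]
    have hstep : pvStep2 (fc, lc) (cb, rm, ad, ca) (k, x) = (cb, rm, ad, ca ++ [pvTxt x]) := by
      simp [pvStep2, hx1, hx2, show ¬(k < fc) by omega, show k > lc by omega, pvTxt]
    rw [hstep, ih (k + 1) _ _ _ _ (fun s hs => h1 s (List.mem_cons_of_mem _ hs))
      (by omega) (by omega)]
    simp

-- the core equality, on the cleaned list
lemma pvMain (c : List String) :
    (PySem.List.enumerate c 0).foldl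
        (pvStep2 ((PySem.List.enumerate c 0).foldl pvStep1 ((c.length : Int), -1))) ([], [], [], []) =
      ((c.takeWhile (fun s => !pvChg s)).map pvTxt, pvRm c, pvAd c,
        if c.any pvChg then pvTail c else []) := by
  rw [A_loop1]
  by_cases h : c.any pvChg
  · -- there is at least one change line
    have hf : List.findIdx pvChg c < c.length :=
      List.findIdx_lt_length_of_exists (by simpa [List.any_eq_true] using h)
    have hr : List.findIdx pvChg c.reverse < c.length := by
      have := List.findIdx_lt_length_of_exists (p := pvChg) (xs := c.reverse)
        (by simpa [List.any_eq_true, List.any_reverse] using h)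
      simpa using this
    have hrl : List.findIdx pvChg c.reverse < c.reverse.length := by simpa using hr
    -- the last change is not before the first change
    have hlast := List.findIdx_getElem (w := hrl)
    rw [List.getElem_reverse] at hlast
    have hfr : List.findIdx pvChg c ≤ c.length - 1 - List.findIdx pvChg c.reverse := by
      by_contra hcon
      push_neg at hcon
      have hflt := List.not_of_lt_findIdx (p := pvChg) (xs := c)
        (i := c.length - 1 - List.findIdx pvChg c.reverse) (by omega)
      exact Bool.false_ne_true (hflt.symm.trans hlast)
    rw [if_pos h, (show (min (c.length : Int) (0 + List.findIdx pvChg c),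
         max (-1) (0 + (c.length : Int) - 1 - List.findIdx pvChg c.reverse)) =
        ((List.findIdx pvChg c : Int),
         (c.length : Int) - 1 - List.findIdx pvChg c.reverse) by
      simp only [Prod.mk.injEq]; constructor <;> omega)]
    -- decompose c into prefix / middle / suffix
    set P := c.take (List.findIdx pvChg c) with hP
    set M := (c.drop (List.findIdx pvChg c)).take (c.length - List.findIdx pvChg c.reverse - List.findIdx pvChg c) with hM
    set S := c.drop (c.length - List.findIdx pvChg c.reverse) with hS
    have hMS : M ++ S = c.drop (List.findIdx pvChg c) := by
      rw [hM, hS, (show c.drop (c.length - List.findIdx pvChg c.reverse) = (c.drop (List.findIdx pvChg c)).drop (c.length - List.findIdx pvChg c.reverse - List.findIdx pvChg c) by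
        rw [List.drop_drop]; congr 1; omega), List.take_append_drop]
    have hc : c = P ++ (M ++ S) := by rw [hMS, hP, List.take_append_drop]
    have hPw : P = c.takeWhile (fun s => !pvChg s) := by
      rw [List.takeWhile_eq_take_findIdx_not, pvFun_not_not, hP]
    have hSw : S = (c.reverse.takeWhile (fun s => !pvChg s)).reverse := by
      rw [List.takeWhile_eq_take_findIdx_not, pvFun_not_not, List.take_reverse,
        List.reverse_reverse]
    have hPnc : ∀ s ∈ P, pvChg s = false := by
      intro s hs
      rw [hPw] at hs
      simpa using List.mem_takeWhile_imp hs
    have hSnc : ∀ s ∈ S, pvChg s = false := by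
      intro s hs
      rw [hSw, List.mem_reverse] at hs
      simpa using List.mem_takeWhile_imp hs
    have hPlen : P.length = List.findIdx pvChg c := by rw [hP, List.length_take]; omega
    have hMlen : M.length = c.length - List.findIdx pvChg c.reverse - List.findIdx pvChg c := by
      rw [hM, List.length_take, List.length_drop]; omega
    rw [(show PySem.List.enumerate c = PySem.List.enumerate (P ++ (M ++ S)) from by
      rw [← hc])]
    rw [PySem.List.enumerate_append, List.foldl_append, PySem.List.enumerate_append,
      List.foldl_append]
    rw [A_pre _ _ _ _ _ _ _ _ hPnc (by rw [hPlen]; omega)]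
    rw [A_post _ _ _ _ _ _ _ _ hSnc (by rw [hPlen, hMlen]; push_cast; omega)
      (by rw [hPlen, hMlen]; push_cast; omega)]
    rw [A_mid _ _ _ _ _ _ _ _ (by rw [hPlen]; push_cast; omega)
      (by rw [hPlen, hMlen]; push_cast; omega)]
    have hRm : pvRm c = pvRm M := by
      conv_lhs => rw [hc]
      rw [pvRm_append, pvRm_append, pvRm_nil_of P hPnc, pvRm_nil_of S hSnc]
      simp
    have hAd : pvAd c = pvAd M := by
      conv_lhs => rw [hc]
      rw [pvAd_append, pvAd_append, pvAd_nil_of P hPnc, pvAd_nil_of S hSnc]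
      simp
    rw [if_pos h, hRm, hAd]
    unfold pvTail
    rw [← hSw, ← hPw]
    simp
  · -- no change line at all: everything is leading context
    rw [if_neg (by simpa using h)]
    have hnc : ∀ s ∈ c, pvChg s = false := fun s hs => by
      simpa using List.any_eq_false.mp (by simpa using h) s hs
    rw [A_pre _ _ _ _ _ _ _ _ hnc (by simp)]
    rw [pvTakeWhile_all c (by simpa using h), pvRm_nil_of c hnc, pvAd_nil_of c hnc,
      if_neg (by simpa using h)]
    simp

-- ===== VERDICT (by name: the statement is the Claim_ definition above) =====
theorem split_hunk_segments_spec : Claim_equal_split_hunk_segments := by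
  intro hunk_lines _
  unfold Spec_split_hunk_segments
  simp only [split_hunk_segments, split_hunk_segments_alt]
  rw [B_unseen]
  simpa using pvMain (hunk_lines.filter
    (fun line => !(["\\"].any (fun pre => PySem.Str.startswith line pre))))
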